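-- pv_equiv track=rewrite | github.com/zzstoatzz/bsky-feed | example_custom_filters.py | _is_spongebob_word
-- ===== SOURCE A (Python) =====
-- MIN_SPONGEBOB_LEN = 7
--
-- def _is_spongebob_word(s: str) -> bool:
--     """
--     Helper function to detect alternating case span in a single pass.
--     Checks for patterns like 'aBaBaBa' or 'BaBaBaB'.
--     """
--     if (
--         len(s) < MIN_SPONGEBOB_LEN
--     ):  # Ensure consistency, though outer function already checks
--         return False
--
--     span_lower_first = 0  # Tracks 'aBaB...' pattern
--     span_upper_first = 0  # Tracks 'BaBa...' pattern
--
--     for char_code in [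
--         ord(c) for c in s
--     ]:  # Iterate using ord for potential minor optimization
--         # char.isalpha()
--         is_alpha = (ord("a") <= char_code <= ord("z")) or (
--             ord("A") <= char_code <= ord("Z")
--         )
--
--         if not is_alpha:
--             span_lower_first = 0
--             span_upper_first = 0
--             continue
--
--         # char.islower()
--         current_char_is_lower = ord("a") <= char_code <= ord("z")
--
--         # Pattern 1: Starts with lowercase (e.g., aBcDeFg)
--         # Expectation: if span_lower_first is even, expect lower; if odd, expect upper.
--         if current_char_is_lower == (span_lower_first % 2 == 0):
--             span_lower_first += 1
--         else:
--             # Mismatch. Can current char start a new lower-first pattern?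
--             if current_char_is_lower:
--                 span_lower_first = 1
--             else:
--                 span_lower_first = 0
--
--         # Pattern 2: Starts with uppercase (e.g., AbCdEfG)
--         # Expectation: if span_upper_first is even, expect upper; if odd, expect lower.
--         if (not current_char_is_lower) == (
--             span_upper_first % 2 == 0
--         ):  # current_char_is_upper == (span_upper_first % 2 == 0)
--             span_upper_first += 1
--         else:
--             # Mismatch. Can current char start a new upper-first pattern?
--             if not current_char_is_lower:  # current_char_is_upper
--                 span_upper_first = 1
--             else:
--                 span_upper_first = 0
--
--         if (
--             span_lower_first >= MIN_SPONGEBOB_LEN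
--             or span_upper_first >= MIN_SPONGEBOB_LEN
--         ):
--             return True
--
--     return False
-- ===== SOURCE B (Python) =====
-- MIN_SPONGEBOB_LEN = 7
--
-- def _alt7(w: str) -> bool:
--     """The 7-char window is all ASCII letters with strictly alternating case."""
--     return all('a' <= c <= 'z' or 'A' <= c <= 'Z' for c in w) and all(
--         ('a' <= a <= 'z') != ('a' <= b <= 'z') for a, b in zip(w, w[1:])
--     )
--
-- def _is_spongebob_word(s: str) -> bool:
--     # A run of >= 7 alternating-case ASCII letters exists iff some 7-char window is alternating.
--     return any(_alt7(s[i:i + MIN_SPONGEBOB_LEN]) for i in range(len(s) - (MIN_SPONGEBOB_LEN - 1)))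
-- ===== Notes on version B (the rewrite author's own statement) =====
-- stated objective: idiomatic
-- what changed: Replaces the two-counter single-pass state machine by an existence check: scan all 7-character windows and test each for being all-ASCII-letters with strictly alternating case (a run of length >= 7 exists iff some 7-char alternating window exists).
import Mathlib
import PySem

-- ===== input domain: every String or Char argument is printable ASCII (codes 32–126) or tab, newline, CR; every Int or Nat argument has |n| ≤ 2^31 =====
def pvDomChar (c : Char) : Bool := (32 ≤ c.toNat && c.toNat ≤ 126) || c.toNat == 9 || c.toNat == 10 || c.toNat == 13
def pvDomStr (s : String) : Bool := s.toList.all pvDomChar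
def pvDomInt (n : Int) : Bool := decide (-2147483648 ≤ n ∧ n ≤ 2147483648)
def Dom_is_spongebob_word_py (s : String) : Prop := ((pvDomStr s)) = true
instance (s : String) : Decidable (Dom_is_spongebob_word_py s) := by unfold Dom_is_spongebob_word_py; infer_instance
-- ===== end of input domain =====

-- B replaces A's two-counter state machine by an existence check over all 7-character
-- windows; both are total and agree on every input.

-- ===== PORT A =====
-- literal transliteration of the for-loop: state (span_lower_first, span_upper_first),
-- the early `return True` becomes the `if … then true` branch.
def spongeLoopA : List Char → Nat → Nat → Bool
  | [], _, _ => false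
  | c :: rest, sl, su =>
    let code := c.toNat                                   -- ord(c)
    let isAlpha := decide (97 ≤ code ∧ code ≤ 122) || decide (65 ≤ code ∧ code ≤ 90)
    if isAlpha = false then spongeLoopA rest 0 0          -- reset both spans, continue
    else
      let lower := decide (97 ≤ code ∧ code ≤ 122)        -- char.islower()
      let sl' := if lower == decide (sl % 2 = 0) then sl + 1
                 else if lower then 1 else 0
      let su' := if (!lower) == decide (su % 2 = 0) then su + 1
                 else if !lower then 1 else 0
      if 7 ≤ sl' ∨ 7 ≤ su' then true else spongeLoopA rest sl' su'

def is_spongebob_word_py (s : String) : Bool :=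
  if s.toList.length < 7 then false
  else spongeLoopA s.toList 0 0

-- ===== PORT B =====
def isSbLetter (c : Char) : Bool := decide ('a' ≤ c ∧ c ≤ 'z') || decide ('A' ≤ c ∧ c ≤ 'Z')

def isSbLower (c : Char) : Bool := decide ('a' ≤ c ∧ c ≤ 'z')

-- _alt7: all chars ASCII letters, adjacent cases differ (zip w w[1:])
def alt7 (w : List Char) : Bool :=
  w.all isSbLetter && (w.zip w.tail).all (fun p => isSbLower p.1 != isSbLower p.2)

-- any(_alt7(s[i:i+7]) for i in range(len(s) - 6)); the slice s[i:i+7] with 0 ≤ i is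
-- exactly (drop i).take 7, and Python's empty range for len(s) < 7 is Nat-truncated `- 6`.
def is_spongebob_word_py_alt (s : String) : Bool :=
  (List.range (s.toList.length - 6)).any (fun i => alt7 ((s.toList.drop i).take 7))

-- ===== PRECONDITION & SPEC =====
def Spec_is_spongebob_word_py (s : String) (out : Bool) : Prop := out = is_spongebob_word_py_alt s
instance (s : String) (out : Bool) : Decidable (Spec_is_spongebob_word_py s out) := by unfold Spec_is_spongebob_word_py; infer_instance

-- ===== CLAIM (what is proved, stated in full; the proofs are below) =====
def Claim_equal_is_spongebob_word_py : Prop := ∀ (s : String), Dom_is_spongebob_word_py s → Spec_is_spongebob_word_py s (is_spongebob_word_py s)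

-- ===== LEMMAS AND PROOFS =====

-- `good p l n` : the first n chars of l are ASCII letters with alternating case,
-- the first one lowercase iff p.
def good (p : Bool) : List Char → Nat → Bool
  | _, 0 => true
  | [], _ + 1 => false
  | c :: r, n + 1 => isSbLetter c && (isSbLower c == p) && good (!p) r n

-- `win l` : some suffix of l starts with 7 alternating-case letters.
def win : List Char → Bool
  | [] => false
  | c :: r => good true (c :: r) 7 || good false (c :: r) 7 || win r

theorem good_zero (p : Bool) (l : List Char) : good p l 0 = true := by cases l <;> rfl

theorem good_cons_succ (p : Bool) (c : Char) (r : List Char) (n : Nat) :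
    good p (c :: r) (n + 1) = (isSbLetter c && (isSbLower c == p) && good (!p) r n) := rfl

theorem good_cons7 (p : Bool) (c : Char) (r : List Char) :
    good p (c :: r) 7 = (isSbLetter c && (isSbLower c == p) && good (!p) r 6) := rfl

theorem win_cons (c : Char) (r : List Char) :
    win (c :: r) = (good true (c :: r) 7 || good false (c :: r) 7 || win r) := rfl

theorem good_len {p : Bool} {l : List Char} {n : Nat} (h : good p l n = true) : n ≤ l.length := by
  induction l generalizing p n with
  | nil => cases n with
    | zero => simp
    | succ m => simp [good] at h
  | cons c r ih =>
    cases n with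
    | zero => simp
    | succ m =>
      simp only [good, Bool.and_eq_true] at h
      simpa using Nat.succ_le_succ (ih h.2)

theorem good_mono {p : Bool} {l : List Char} {m n : Nat} (hmn : m ≤ n)
    (h : good p l n = true) : good p l m = true := by
  induction l generalizing p m n with
  | nil =>
    cases m with
    | zero => simp [good]
    | succ k =>
      cases n with
      | zero => omega
      | succ n' => simp [good] at h
  | cons c r ih =>
    cases m with
    | zero => simp [good]
    | succ m' =>
      cases n with
      | zero => omega
      | succ n' =>
        simp only [good, Bool.and_eq_true] at h ⊢
        exact ⟨h.1, ih (by omega) h.2⟩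

theorem good_le_win {p : Bool} {l : List Char} (h : good p l 7 = true) : win l = true := by
  cases l with
  | nil => simp [good] at h
  | cons c r => cases p <;> simp [win, h]

theorem win_short {l : List Char} (h : l.length < 7) : win l = false := by
  induction l with
  | nil => rfl
  | cons c r ih =>
    simp only [win, Bool.or_eq_false_iff]
    refine ⟨⟨?_, ?_⟩, ih (by simp at h; omega)⟩ <;>
    · cases hg : good _ (c :: r) 7
      · rfl
      · exact absurd (good_len hg) (by simp at h ⊢; omega)

theorem good_take (p : Bool) (r : List Char) (n : Nat) : good p (r.take n) n = good p r n := by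
  induction n generalizing p r with
  | zero => simp [good]
  | succ m ih =>
    cases r with
    | nil => simp
    | cons c t => simp [good, ih]

theorem alt7_eq_good (c : Char) (t : List Char) :
    alt7 (c :: t) = (isSbLetter c && good (!(isSbLower c)) t t.length) := by
  induction t generalizing c with
  | nil => simp [alt7, good]
  | cons d u ih =>
    have ihd := ih d
    cases hc : isSbLower c <;> cases hd : isSbLower d <;>
      simp [alt7, good, hc, hd] at ihd ⊢ <;>
      (cases hLd : isSbLetter d <;> simp [hLd] at ihd ⊢ <;> try rw [Bool.and_assoc, ihd])

theorem alt7_take_eq {w : List Char} (h : 7 ≤ w.length) :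
    alt7 (w.take 7) = (good true w 7 || good false w 7) := by
  cases w with
  | nil => simp at h
  | cons c r =>
    have hr : 6 ≤ r.length := by simp at h; omega
    have hlen : (r.take 6).length = 6 := by simp [hr]
    have : (c :: r).take 7 = c :: r.take 6 := by rfl
    rw [this, alt7_eq_good, hlen, good_take (!(isSbLower c)) r 6]
    cases hc : isSbLower c <;> simp [good_cons7, hc]

-- B's range-scan computes `win`.
theorem alt_eq_win (l : List Char) :
    (List.range (l.length - 6)).any (fun i => alt7 ((l.drop i).take 7)) = win l := by
  induction l with
  | nil => rfl
  | cons c r ih =>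
    by_cases h7 : (c :: r).length < 7
    · have h0 : (c :: r).length - 6 = 0 := by omega
      rw [h0, win_short h7]; rfl
    · have h6 : (c :: r).length - 6 = (r.length - 6) + 1 := by simp at h7 ⊢; omega
      rw [h6, List.range_succ_eq_map]
      simp only [List.any_cons, List.any_map]
      rw [win_cons]
      have hlen : 7 ≤ (c :: r).length := by omega
      have e1 : alt7 (List.take 7 (List.drop 0 (c :: r))) = (good true (c :: r) 7 || good false (c :: r) 7) := by
        simpa using alt7_take_eq hlen
      have e2 : ((List.range (r.length - 6)).any ((fun i => alt7 (List.take 7 (List.drop i (c :: r)))) ∘ Nat.succ)) = win r := by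
        rw [← ih]; rfl
      rw [e1, e2]

theorem loopA_cons (c : Char) (r : List Char) (sl su : Nat) :
    spongeLoopA (c :: r) sl su =
      (if (decide (97 ≤ c.toNat ∧ c.toNat ≤ 122) || decide (65 ≤ c.toNat ∧ c.toNat ≤ 90)) = false
       then spongeLoopA r 0 0
       else
        if 7 ≤ (if decide (97 ≤ c.toNat ∧ c.toNat ≤ 122) == decide (sl % 2 = 0) then sl + 1
                else if decide (97 ≤ c.toNat ∧ c.toNat ≤ 122) then 1 else 0) ∨
           7 ≤ (if (!decide (97 ≤ c.toNat ∧ c.toNat ≤ 122)) == decide (su % 2 = 0) then su + 1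
                else if !decide (97 ≤ c.toNat ∧ c.toNat ≤ 122) then 1 else 0)
        then true
        else spongeLoopA r
          (if decide (97 ≤ c.toNat ∧ c.toNat ≤ 122) == decide (sl % 2 = 0) then sl + 1
           else if decide (97 ≤ c.toNat ∧ c.toNat ≤ 122) then 1 else 0)
          (if (!decide (97 ≤ c.toNat ∧ c.toNat ≤ 122)) == decide (su % 2 = 0) then su + 1
           else if !decide (97 ≤ c.toNat ∧ c.toNat ≤ 122) then 1 else 0)) := rfl

-- The core invariant: the loop from state (sl, su) succeeds iff the rest of the list
-- completes the lower-first span, completes the upper-first span, or contains a fresh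
-- 7-letter alternating window.
theorem loopA_iff (l : List Char) (sl su : Nat) (hsl : sl < 7) (hsu : su < 7) :
    (spongeLoopA l sl su = true ↔
      (good (decide (sl % 2 = 0)) l (7 - sl) = true ∨
       good (!decide (su % 2 = 0)) l (7 - su) = true ∨
       win l = true)) := by
  induction l generalizing sl su with
  | nil =>
    have h1 : 7 - sl = (6 - sl) + 1 := by omega
    have h2 : 7 - su = (6 - su) + 1 := by omega
    rw [h1, h2]
    simp [spongeLoopA, good, win]
  | cons c r ih =>
    have h1 : 7 - sl = (6 - sl) + 1 := by omega
    have h2 : 7 - su = (6 - su) + 1 := by omega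
    have hL : (decide (97 ≤ c.toNat ∧ c.toNat ≤ 122) || decide (65 ≤ c.toNat ∧ c.toNat ≤ 90)) = isSbLetter c := by
      simp only [isSbLetter, Char.le_def, UInt32.le_iff_toNat_le, Char.toNat_val]; rfl
    have hlow : decide (97 ≤ c.toNat ∧ c.toNat ≤ 122) = isSbLower c := by
      simp only [isSbLower, Char.le_def, UInt32.le_iff_toNat_le, Char.toNat_val]; rfl
    rw [h1, h2, loopA_cons, hL, hlow]
    cases hletter : isSbLetter c with
    | false =>
      rw [if_pos rfl, ih 0 0 (by omega) (by omega)]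
      have g1 : good (decide (sl % 2 = 0)) (c :: r) (6 - sl + 1) = false := by
        rw [good_cons_succ]; simp [hletter]
      have g2 : good (!decide (su % 2 = 0)) (c :: r) (6 - su + 1) = false := by
        rw [good_cons_succ]; simp [hletter]
      have hw : win (c :: r) = win r := by
        rw [win_cons, good_cons7, good_cons7]; simp [hletter]
      rw [g1, g2, hw]
      constructor
      · rintro (h | h | h)
        · exact Or.inr (Or.inr (good_le_win h))
        · exact Or.inr (Or.inr (good_le_win h))
        · exact Or.inr (Or.inr h)
      · rintro (h | h | h) <;> simp_all
    | true =>
      rw [if_neg (by simp)]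
      cases hb : isSbLower c with
      | true =>
        have gT : ∀ k, good true (c :: r) (k + 1) = good false r k := fun k => by
          rw [good_cons_succ]; simp [hletter, hb]
        have gF : ∀ k, good false (c :: r) (k + 1) = false := fun k => by
          rw [good_cons_succ]; simp [hb]
        have hw : win (c :: r) = (good false r 6 || win r) := by
          rw [win_cons, good_cons7, good_cons7]; simp [hletter, hb]
        by_cases hps : sl % 2 = 0 <;> by_cases hqs : su % 2 = 0 <;>
          simp only [hps, hqs, decide_true, decide_false, Bool.not_true, Bool.not_false,
            beq_self_eq_true, Bool.true_beq, Bool.false_beq, Bool.false_eq_true,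
            if_true, ite_false]
        · -- lower char, sl even (match, sl+1), su even (mismatch, 0)
          rw [gT, gF, hw]
          by_cases h6 : sl = 6
          · rw [if_pos (by omega)]
            constructor
            · intro _
              exact Or.inl (by subst h6; exact good_zero false r)
            · intro _; rfl
          · rw [if_neg (by omega), ih (sl + 1) 0 (by omega) (by omega),
              decide_eq_false (by omega : ¬((sl + 1) % 2 = 0)),
              (by omega : 7 - (sl + 1) = 6 - sl)]
            simp only [Nat.zero_mod, decide_true, Bool.not_true, Nat.sub_zero,
              Bool.or_eq_true, Bool.false_eq_true]
            constructor
            · rintro (h | h | h)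
              · exact Or.inl h
              · exact Or.inr (Or.inr (Or.inl (good_mono (by omega) h)))
              · exact Or.inr (Or.inr (Or.inr h))
            · rintro (h | h | h | h)
              · exact Or.inl h
              · exact h.elim
              · exact Or.inl (good_mono (by omega) h)
              · exact Or.inr (Or.inr h)
        · -- lower char, sl even (match), su odd (match)
          rw [gT, gT, hw]
          by_cases h6 : sl = 6
          · rw [if_pos (by omega)]
            constructor
            · intro _
              exact Or.inl (by subst h6; exact good_zero false r)
            · intro _; rfl
          · rw [if_neg (by omega), ih (sl + 1) (su + 1) (by omega) (by omega),
              decide_eq_false (by omega : ¬((sl + 1) % 2 = 0)),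
              decide_eq_true (by omega : (su + 1) % 2 = 0),
              (by omega : 7 - (sl + 1) = 6 - sl), (by omega : 7 - (su + 1) = 6 - su)]
            simp only [Bool.not_true, Bool.or_eq_true]
            constructor
            · rintro (h | h | h)
              · exact Or.inl h
              · exact Or.inr (Or.inl h)
              · exact Or.inr (Or.inr (Or.inr h))
            · rintro (h | h | h | h)
              · exact Or.inl h
              · exact Or.inr (Or.inl h)
              · exact Or.inl (good_mono (by omega) h)
              · exact Or.inr (Or.inr h)
        · -- lower char, sl odd (restart 1), su even (mismatch, 0)
          rw [gF, gF, hw]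
          rw [if_neg (by omega), ih 1 0 (by omega) (by omega),
            decide_eq_false (by omega : ¬((1 : Nat) % 2 = 0))]
          simp only [Nat.zero_mod, decide_true, Bool.not_true, Nat.sub_zero,
            Bool.or_eq_true, Bool.false_eq_true]
          constructor
          · rintro (h | h | h)
            · exact Or.inr (Or.inr (Or.inl h))
            · exact Or.inr (Or.inr (Or.inl (good_mono (by omega) h)))
            · exact Or.inr (Or.inr (Or.inr h))
          · rintro (h | h | h | h)
            · exact h.elim
            · exact h.elim
            · exact Or.inl h
            · exact Or.inr (Or.inr h)
        · -- lower char, sl odd (restart 1), su odd (match)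
          rw [gF, gT, hw]
          rw [if_neg (by omega), ih 1 (su + 1) (by omega) (by omega),
            decide_eq_false (by omega : ¬((1 : Nat) % 2 = 0)),
            decide_eq_true (by omega : (su + 1) % 2 = 0),
            (by omega : 7 - (su + 1) = 6 - su)]
          simp only [Bool.not_true, Bool.or_eq_true, Bool.false_eq_true]
          constructor
          · rintro (h | h | h)
            · exact Or.inr (Or.inr (Or.inl h))
            · exact Or.inr (Or.inl h)
            · exact Or.inr (Or.inr (Or.inr h))
          · rintro (h | h | h | h)
            · exact h.elim
            · exact Or.inr (Or.inl h)
            · exact Or.inl h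
            · exact Or.inr (Or.inr h)
      | false =>
        have gF : ∀ k, good false (c :: r) (k + 1) = good true r k := fun k => by
          rw [good_cons_succ]; simp [hletter, hb]
        have gT : ∀ k, good true (c :: r) (k + 1) = false := fun k => by
          rw [good_cons_succ]; simp [hb]
        have hw : win (c :: r) = (good true r 6 || win r) := by
          rw [win_cons, good_cons7, good_cons7]; simp [hletter, hb]
        by_cases hps : sl % 2 = 0 <;> by_cases hqs : su % 2 = 0 <;>
          simp only [hps, hqs, decide_true, decide_false, Bool.not_true, Bool.not_false,
            beq_self_eq_true, Bool.true_beq, Bool.false_beq, Bool.false_eq_true,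
            if_true, ite_false]
        · -- upper char, sl even (mismatch, 0), su even (match, su+1)
          rw [gT, gF, hw]
          by_cases h6 : su = 6
          · rw [if_pos (by omega)]
            constructor
            · intro _
              exact Or.inr (Or.inl (by subst h6; exact good_zero true r))
            · intro _; rfl
          · rw [if_neg (by omega), ih 0 (su + 1) (by omega) (by omega),
              decide_eq_false (by omega : ¬((su + 1) % 2 = 0)),
              (by omega : 7 - (su + 1) = 6 - su)]
            simp only [Nat.zero_mod, decide_true, Nat.sub_zero,
              Bool.or_eq_true, Bool.false_eq_true]
            constructor
            · rintro (h | h | h)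
              · exact Or.inr (Or.inr (Or.inl (good_mono (by omega) h)))
              · exact Or.inr (Or.inl h)
              · exact Or.inr (Or.inr (Or.inr h))
            · rintro (h | h | h | h)
              · exact h.elim
              · exact Or.inr (Or.inl h)
              · exact Or.inr (Or.inl (good_mono (by omega) h))
              · exact Or.inr (Or.inr h)
        · -- upper char, sl even (mismatch, 0), su odd (restart 1)
          rw [gT, gT, hw]
          rw [if_neg (by omega), ih 0 1 (by omega) (by omega),
            decide_eq_false (by omega : ¬((1 : Nat) % 2 = 0))]
          simp only [Nat.zero_mod, decide_true, Nat.sub_zero, Bool.not_false,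
            Bool.or_eq_true, Bool.false_eq_true]
          constructor
          · rintro (h | h | h)
            · exact Or.inr (Or.inr (Or.inl (good_mono (by omega) h)))
            · exact Or.inr (Or.inr (Or.inl h))
            · exact Or.inr (Or.inr (Or.inr h))
          · rintro (h | h | h | h)
            · exact h.elim
            · exact h.elim
            · exact Or.inr (Or.inl h)
            · exact Or.inr (Or.inr h)
        · -- upper char, sl odd (match, sl+1), su even (match, su+1)
          rw [gF, gF, hw]
          by_cases h6 : su = 6
          · rw [if_pos (by omega)]
            constructor
            · intro _
              exact Or.inr (Or.inl (by subst h6; exact good_zero true r))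
            · intro _; rfl
          · rw [if_neg (by omega), ih (sl + 1) (su + 1) (by omega) (by omega),
              decide_eq_true (by omega : (sl + 1) % 2 = 0),
              decide_eq_false (by omega : ¬((su + 1) % 2 = 0)),
              (by omega : 7 - (sl + 1) = 6 - sl), (by omega : 7 - (su + 1) = 6 - su)]
            simp only [Bool.not_false, Bool.or_eq_true]
            constructor
            · rintro (h | h | h)
              · exact Or.inl h
              · exact Or.inr (Or.inl h)
              · exact Or.inr (Or.inr (Or.inr h))
            · rintro (h | h | h | h)
              · exact Or.inl h
              · exact Or.inr (Or.inl h)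
              · exact Or.inl (good_mono (by omega) h)
              · exact Or.inr (Or.inr h)
        · -- upper char, sl odd (match, sl+1), su odd (restart 1)
          rw [gF, gT, hw]
          rw [if_neg (by omega), ih (sl + 1) 1 (by omega) (by omega),
            decide_eq_true (by omega : (sl + 1) % 2 = 0),
            decide_eq_false (by omega : ¬((1 : Nat) % 2 = 0)),
            (by omega : 7 - (sl + 1) = 6 - sl)]
          simp only [Bool.not_false, Bool.or_eq_true, Bool.false_eq_true]
          constructor
          · rintro (h | h | h)
            · exact Or.inl h
            · exact Or.inr (Or.inr (Or.inl h))
            · exact Or.inr (Or.inr (Or.inr h))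
          · rintro (h | h | h | h)
            · exact Or.inl h
            · exact h.elim
            · exact Or.inr (Or.inl h)
            · exact Or.inr (Or.inr h)

-- ===== VERDICT (by name: the statement is the Claim_ definition above) =====
theorem is_spongebob_word_py_spec : Claim_equal_is_spongebob_word_py := by
  intro s _
  unfold Spec_is_spongebob_word_py is_spongebob_word_py is_spongebob_word_py_alt
  rw [alt_eq_win]
  by_cases h7 : s.toList.length < 7
  · rw [if_pos h7, win_short h7]
  · rw [if_neg h7, Bool.eq_iff_iff, loopA_iff s.toList 0 0 (by omega) (by omega)]
    constructor
    · rintro (h | h | h)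
      · exact good_le_win (by simpa using h)
      · exact good_le_win (by simpa using h)
      · exact h
    · intro h; exact Or.inr (Or.inr h)
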